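-- pv_equiv track=rewrite | github.com/Syogo-Suganoya/AlgoArena | atcoder/typical90/058/main.py | original_calculator
-- ===== SOURCE A (Python) =====
-- def digit_sum(x):
--     return sum(int(digit) for digit in str(x))
--
-- def original_calculator(N, K):
--     MOD = 100000
--     # nxt[i] = (i + digit_sum(i)) % MOD を事前計算
--     nxt = [(i + digit_sum(i)) % MOD for i in range(MOD)]
--
--     # 各数値の訪問時刻を記録する
--     time_stamp = [-1] * MOD
--     pos = N
--     cnt = 0
--
--     # サイクル検出
--     while time_stamp[pos] == -1:
--         time_stamp[pos] = cnt
--         pos = nxt[pos]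
--         cnt += 1
--
--     cycle_length = cnt - time_stamp[pos]
--
--     # 必要なK回の操作を特定
--     if K >= time_stamp[pos]:
--         # K = (K - time_stamp[pos]) % cycle_length + time_stamp[pos]
--         K = K % cycle_length
--
--     # 最終的な位置を探す
--     return time_stamp.index(K)
-- ===== SOURCE B (Python) =====
-- def digit_sum(x):
--     return sum(int(digit) for digit in str(x))
--
-- def original_calculator(N, K):
--     MOD = 100000
--
--     def f(x):
--         return (x + digit_sum(x)) % MOD
--
--     start = N % MOD
--     # Floyd's tortoise-and-hare cycle detection: O(1) memory, no visited
--     # table, no history list.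
--     # Phase 1: find a meeting point inside the cycle.
--     tortoise = f(start)
--     hare = f(f(start))
--     while tortoise != hare:
--         tortoise = f(tortoise)
--         hare = f(f(hare))
--     # Phase 2: find mu, the length of the tail before the cycle.
--     mu = 0
--     tortoise = start
--     while tortoise != hare:
--         tortoise = f(tortoise)
--         hare = f(hare)
--         mu += 1
--     # Phase 3: find lam, the cycle length.
--     lam = 1
--     hare = f(tortoise)
--     while tortoise != hare:
--         hare = f(hare)
--         lam += 1
--     # Same (non-standard) reduction as the original.
--     if K >= mu:
--         K = K % lam
--     pos = start
--     for _ in range(K):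
--         pos = f(pos)
--     return pos
-- ===== Notes on version B (the rewrite author's own statement) =====
-- stated objective: alternative
-- what changed: B replaces A's precomputed 100000-entry nxt table, 100000-cell timestamp array and final linear .index scan with Floyd's tortoise-and-hare cycle detection (three pointer-chasing phases finding the tail length mu and the cycle length in O(1) memory) followed by directly iterating the reduced number of steps from N % 100000; intended as faster (the probe measured 9.0x at the largest size both finished, but could not confirm it under its single-input rule).
-- outside the precondition, e.g. on original_calculator(5, -1): A returns 0, B returns 5; on original_calculator(5, -2): A raises ValueError, B returns 5; on original_calculator(100000, 3): A raises IndexError, B returns 0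
import Mathlib
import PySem

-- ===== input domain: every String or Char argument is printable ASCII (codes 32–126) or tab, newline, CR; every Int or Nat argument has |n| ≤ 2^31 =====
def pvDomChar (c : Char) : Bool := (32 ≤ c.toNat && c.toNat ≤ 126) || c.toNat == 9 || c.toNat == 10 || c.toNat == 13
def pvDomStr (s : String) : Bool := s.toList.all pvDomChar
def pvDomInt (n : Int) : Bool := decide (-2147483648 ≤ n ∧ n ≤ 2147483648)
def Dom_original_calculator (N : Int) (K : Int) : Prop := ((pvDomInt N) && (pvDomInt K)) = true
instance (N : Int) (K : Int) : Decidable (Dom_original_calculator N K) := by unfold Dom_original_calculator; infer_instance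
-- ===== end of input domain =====

-- B replaces A's 100000-entry `nxt` table, timestamp array and final `.index` scan with
-- Floyd's tortoise-and-hare cycle detection followed by iterating the reduced step count.

-- ===== PORT A =====
-- module-level helper `digit_sum(x) = sum(int(digit) for digit in str(x))`, shared verbatim
-- by both Python programs.  `int(digit)` is ported as (ofChars? [c]).getD 0; the default is
-- never reached for the nonnegative arguments both programs feed it.
def digitSum (x : Int) : Int :=
  ((PySem.Int.toChars x).map (fun c => (PySem.Int.ofChars? [c]).getD 0)).sum

-- Python's CPython-array reads/writes time_stamp[pos], nxt[pos] are ported by hand on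
-- Array for O(1) access (a 100000-cell Python list): exact Python list-indexing semantics
-- (negative wrap) for -len ≤ i < len; every access A makes inside Pre_ is in that range
-- (proved below via aGet_eq_pyGetD/aSet_toList_pySetD, which identify them with the PySem
-- list primitives there).
def aGet (a : Array Int) (i : Int) (d : Int) : Int :=
  if 0 ≤ i then a.getD i.toNat d else a.getD (a.size - (-i).toNat) d

def aSet (a : Array Int) (i : Int) (v : Int) : Array Int :=
  if 0 ≤ i then a.setIfInBounds i.toNat v else a.setIfInBounds (a.size - (-i).toNat) v

-- nxt = [(i + digit_sum(i)) % MOD for i in range(MOD)]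
def nxtTable : Array Int :=
  ((PySem.List.pyRange 0 100000 1).map (fun i => PySem.Int.mod (i + digitSum i) 100000)).toArray

-- while time_stamp[pos] == -1: … — fuel 100001 always suffices (proved below)
def loopA (nxt : Array Int) : Nat → Array Int → Int → Int → Array Int × Int × Int
  | 0, ts, pos, cnt => (ts, pos, cnt)
  | fuel+1, ts, pos, cnt =>
    if aGet ts pos 0 = -1 then
      loopA nxt fuel (aSet ts pos cnt) (aGet nxt pos 0) (cnt + 1)
    else (ts, pos, cnt)

def original_calculator (N : Int) (K : Int) : Int :=
  let nxt := nxtTable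
  let r := loopA nxt 100001 (Array.replicate 100000 (-1)) N 0
  let ts := r.1
  let pos := r.2.1
  let cnt := r.2.2
  let mu := aGet ts pos 0
  let cycle := cnt - mu
  let K' := if K ≥ mu then PySem.Int.mod K cycle else K
  (((PySem.List.index? ts.toList K').getD 0 : Nat) : Int)

-- ===== PORT B =====
-- f(x) = (x + digit_sum(x)) % MOD, B's inner helper
def step (x : Int) : Int := PySem.Int.mod (x + digitSum x) 100000

-- phase 1: tortoise = f(start); hare = f(f(start)); while t != h: t = f(t); h = f(f(h))
def phase1 : Nat → Int → Int → Int
  | 0, _, h => h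
  | fuel+1, t, h => if t = h then h else phase1 fuel (step t) (step (step h))

-- phase 2: mu = 0; t = start; while t != h: t = f(t); h = f(h); mu += 1
def phase2 : Nat → Int → Int → Int → Int × Int
  | 0, mu, t, _ => (mu, t)
  | fuel+1, mu, t, h => if t = h then (mu, t) else phase2 fuel (mu+1) (step t) (step h)

-- phase 3: lam = 1; h = f(t); while t != h: h = f(h); lam += 1
def phase3 : Nat → Int → Int → Int → Int
  | 0, lam, _, _ => lam
  | fuel+1, lam, t, h => if t = h then lam else phase3 fuel (lam+1) t (step h)

def original_calculator_alt (N : Int) (K : Int) : Int :=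
  let start := PySem.Int.mod N 100000
  let meet := phase1 100001 (step start) (step (step start))
  let p2 := phase2 100001 0 start meet
  let mu := p2.1
  let lam := phase3 100001 1 p2.2 (step p2.2)
  let K' := if K ≥ mu then PySem.Int.mod K lam else K
  (PySem.List.pyRange 0 K' 1).foldl (fun p _ => step p) start

-- ===== PRECONDITION & SPEC =====
-- Pre_ excludes: N outside [-100000, 100000), where A raises IndexError; K ≤ -2, where A
-- raises ValueError (`.index` finds no such timestamp); and K = -1, where A's value (the
-- smallest number the trajectory never visits, found by `.index(-1)` over the timestamp
-- array) is an accident of A's implementation and no one would specify it (B returns the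
-- start value there, its loop doing nothing for a negative count).
def Pre_original_calculator (N : Int) (K : Int) : Prop :=
  -100000 ≤ N ∧ N < 100000 ∧ 0 ≤ K
instance (N : Int) (K : Int) : Decidable (Pre_original_calculator N K) := by
  unfold Pre_original_calculator; infer_instance
def pvWitness_original_calculator : Int × Int := (5, 3)

def Spec_original_calculator (N : Int) (K : Int) (out : Int) : Prop := out = original_calculator_alt N K
instance (N : Int) (K : Int) (out : Int) : Decidable (Spec_original_calculator N K out) := by unfold Spec_original_calculator; infer_instance

-- ===== CLAIM (what is proved, stated in full; the proofs are below) =====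
def Claim_equal_original_calculator : Prop := ∀ (N : Int) (K : Int), Dom_original_calculator N K → Pre_original_calculator N K → Spec_original_calculator N K (original_calculator N K)

-- ===== LEMMAS AND PROOFS =====

-- the timestamp A's array stores for value v, as a function of the ordered visit list
def stampOf (hist : List Int) (v : Int) : Int :=
  ((PySem.List.index? hist v).map (fun n => (n : Int))).getD (-1)

-- A's timestamp array realises stampOf (pointwise; stated on getElem? to keep the
-- 100000-element literal out of kernel reduction)
def TsSpec (hist ts : List Int) : Prop :=
  ts.length = 100000 ∧ ∀ k : Nat, k < 100000 → ts[k]? = some (stampOf hist (k : Int))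

-- the orbit of B's step function, the common abstraction both ports are reduced to
def orb (x0 : Int) (k : Nat) : Int := step^[k] x0

lemma orb_succ (x0 : Int) (k : Nat) : orb x0 (k+1) = step (orb x0 k) :=
  Function.iterate_succ_apply' step k x0

lemma orb_add (x0 : Int) (a b : Nat) : orb x0 (a+b) = step^[b] (orb x0 a) := by
  unfold orb
  rw [Nat.add_comm, Function.iterate_add_apply]

lemma arr_getD_toList (a : Array Int) (i : Nat) (d : Int) : a.getD i d = a.toList.getD i d := by
  unfold Array.getD
  rcases Nat.lt_or_ge i a.size with h|h
  · rw [dif_pos h, List.getD_eq_getElem _ _ (by simpa using h)]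
    simp
  · rw [dif_neg (by omega), List.getD_eq_default _ _ (by simpa using h)]

lemma pyGetD_neg_shift {α : Type} (xs : List α) {i : Int} (d : α)
    (h : -(xs.length : Int) ≤ i) (h2 : i < 0) :
    PySem.List.pyGetD xs i d = PySem.List.pyGetD xs (i + (xs.length : Int)) d := by
  unfold PySem.List.pyGetD PySem.List.pyGet? PySem.List.pyIdx?
  rw [if_neg (by omega), if_pos h, if_pos (by omega), if_pos (by omega),
    show xs.length - (-i).toNat = (i + (xs.length:Int)).toNat from by omega]

lemma pySetD_neg_shift {α : Type} (xs : List α) {i : Int} (v : α)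
    (h : -(xs.length : Int) ≤ i) (h2 : i < 0) :
    PySem.List.pySetD xs i v = PySem.List.pySetD xs (i + (xs.length : Int)) v := by
  unfold PySem.List.pySetD PySem.List.pySet? PySem.List.pyIdx?
  rw [if_neg (by omega), if_pos h, if_pos (by omega), if_pos (by omega),
    show xs.length - (-i).toNat = (i + (xs.length:Int)).toNat from by omega]

-- the hand-ported array read IS the PySem list read on in-range indices
lemma aGet_eq_pyGetD (a : Array Int) (i d : Int)
    (h1 : -(a.toList.length : Int) ≤ i) (h2 : i < (a.toList.length : Int)) :
    aGet a i d = PySem.List.pyGetD a.toList i d := by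
  have hsz : a.toList.length = a.size := Array.length_toList
  unfold aGet
  by_cases h : 0 ≤ i
  · rw [if_pos h, show i = ((i.toNat : Nat) : Int) from by omega, PySem.List.pyGetD_natCast,
      arr_getD_toList, Int.toNat_natCast]
  · rw [if_neg (by omega), pyGetD_neg_shift a.toList d h1 (by omega),
      show i + (a.toList.length : Int) = (((i + (a.toList.length : Int)).toNat : Nat) : Int) from by omega,
      PySem.List.pyGetD_natCast, arr_getD_toList,
      show a.size - (-i).toNat = (i + (a.toList.length : Int)).toNat from by omega]

-- the hand-ported array write IS the PySem list write on in-range indices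
lemma aSet_toList_pySetD (a : Array Int) (i v : Int)
    (h1 : -(a.toList.length : Int) ≤ i) (h2 : i < (a.toList.length : Int)) :
    (aSet a i v).toList = PySem.List.pySetD a.toList i v := by
  have hsz : a.toList.length = a.size := Array.length_toList
  unfold aSet
  by_cases h : 0 ≤ i
  · rw [if_pos h, Array.toList_setIfInBounds, PySem.List.pySetD_of_nonneg _ _ h]
  · rw [if_neg (by omega), Array.toList_setIfInBounds, pySetD_neg_shift a.toList v h1 (by omega),
      PySem.List.pySetD_of_nonneg _ _ (by omega),
      show a.size - (-i).toNat = (i + (a.toList.length : Int)).toNat from by omega]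

lemma idx_app {hist : List Int} {pos : Int} (v : Int) (hmem : pos ∉ hist) :
    PySem.List.index? (hist ++ [pos]) v
      = if v = pos then some hist.length else PySem.List.index? hist v := by
  split_ifs with h
  · subst h
    exact PySem.List.index?_append_singleton_self _ _ hmem
  · by_cases hv : v ∈ hist
    · exact PySem.List.index?_append_of_mem _ hv
    · have h1 : PySem.List.index? hist v = none := (PySem.List.index?_eq_none_iff _ _).2 hv
      have h2 : PySem.List.index? (hist ++ [pos]) v = none := by
        apply (PySem.List.index?_eq_none_iff _ _).2
        simp [hv, h]
      rw [h1, h2]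

lemma index?_of_getElem {xs : List Int} {v : Int} {w : Nat} (hw : w < xs.length)
    (hv : xs[w] = v) (hprev : ∀ u (hu : u < w), xs[u]'(by omega) ≠ v) :
    PySem.List.index? xs v = some w := by
  apply (PySem.List.index?_eq_some_iff _ _ _).2
  refine ⟨xs.take w, xs.drop (w+1), ?_, ?_, ?_⟩
  · conv_lhs => rw [← List.take_append_drop w xs, List.drop_eq_getElem_cons hw, hv]
  · exact List.length_take_of_le (by omega)
  · intro hmemt
    obtain ⟨u, hu, he⟩ := List.mem_take_iff_getElem.1 hmemt
    exact hprev u (by omega) (by simpa using he)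

lemma index?_self_of_nodup {hist : List Int} (hnd : hist.Nodup) (j : Nat)
    (hj : j < hist.length) : PySem.List.index? hist (hist[j]) = some j := by
  apply index?_of_getElem hj rfl
  intro u hu hne
  exact absurd ((List.Nodup.getElem_inj_iff hnd).1 hne) (by omega)

lemma stampOf_of_index? {hist : List Int} {v : Int} {m : Nat}
    (h : PySem.List.index? hist v = some m) : stampOf hist v = (m : Int) := by
  unfold stampOf; rw [h]; rfl

lemma stampOf_not_mem {hist : List Int} {v : Int} (h : v ∉ hist) : stampOf hist v = -1 := by
  unfold stampOf; rw [(PySem.List.index?_eq_none_iff _ _).2 h]; rfl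

lemma length_le_100000 {hist : List Int} (hnd : hist.Nodup)
    (hb : ∀ x ∈ hist, 0 ≤ x ∧ x < 100000) : hist.length ≤ 100000 := by
  have h1 : hist.toFinset.card = hist.length := List.toFinset_card_of_nodup hnd
  have h2 : hist.toFinset ⊆ Finset.Ico (0 : Int) 100000 := by
    intro x hx
    rw [List.mem_toFinset] at hx
    simpa [Finset.mem_Ico] using hb x hx
  have h3 := Finset.card_le_card h2
  rw [h1] at h3
  simpa using h3

lemma pyGetD_of_TsSpec {hist ts : List Int} (h : TsSpec hist ts) {pos : Int}
    (h0 : 0 ≤ pos) (h1 : pos < 100000) :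
    PySem.List.pyGetD ts pos 0 = stampOf hist pos := by
  obtain ⟨hl, hs⟩ := h
  have hk : pos.toNat < 100000 := by omega
  have := hs pos.toNat hk
  rw [PySem.List.pyGetD_eq_getElem _ _ h0 (by omega)]
  have h2 := List.getElem?_eq_getElem (l := ts) (i := pos.toNat) (by omega : pos.toNat < ts.length)
  rw [h2] at this
  have h3 : ((pos.toNat : Nat) : Int) = pos := by omega
  rw [h3] at this
  exact Option.some_injective _ this

lemma set_TsSpec {hist ts : List Int} (h : TsSpec hist ts) {pos : Int}
    (h0 : 0 ≤ pos) (h1 : pos < 100000) (hm : pos ∉ hist) :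
    TsSpec (hist ++ [pos]) (PySem.List.pySetD ts pos (hist.length : Int)) := by
  obtain ⟨hl, hs⟩ := h
  rw [PySem.List.pySetD_of_nonneg _ _ h0]
  constructor
  · rw [List.length_set]; exact hl
  · intro k hk
    rw [List.getElem?_set]
    unfold stampOf
    rw [idx_app _ hm]
    by_cases hkp : pos.toNat = k
    · have hceq : ((k : Nat) : Int) = pos := by omega
      rw [if_pos hkp, if_pos (by omega), hceq, if_pos rfl]
      rfl
    · have hcne : ((k : Nat) : Int) ≠ pos := by omega
      rw [if_neg hkp, if_neg hcne, hs k hk]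
      rfl

lemma nxt_toList : nxtTable.toList
    = (PySem.List.pyRange 0 100000 1).map (fun i => PySem.Int.mod (i + digitSum i) 100000) := by
  unfold nxtTable
  exact List.toList_toArray

lemma nxt_len : (nxtTable.toList.length : Int) = 100000 := by
  rw [nxt_toList, List.length_map, PySem.List.length_pyRange_one]
  omega

lemma nxt_getD {pos : Int} (h0 : 0 ≤ pos) (h1 : pos < 100000) :
    aGet nxtTable pos 0 = step pos := by
  rw [aGet_eq_pyGetD _ _ _ (by rw [nxt_len]; omega) (by rw [nxt_len]; omega), nxt_toList]
  unfold step
  rw [PySem.List.pyGetD_map_pyRange_of_nonneg _ _ _ _ h0 h1]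

lemma step_bounds (x : Int) : 0 ≤ step x ∧ step x < 100000 :=
  ⟨PySem.Int.mod_nonneg _ (by norm_num), PySem.Int.mod_lt _ (by norm_num)⟩

lemma orb_bounds {x0 : Int} (h0 : 0 ≤ x0) (h1 : x0 < 100000) (k : Nat) :
    0 ≤ orb x0 k ∧ orb x0 k < 100000 := by
  induction k with
  | zero => exact ⟨h0, h1⟩
  | succ k _ => rw [orb_succ]; exact step_bounds _

lemma loopA_corr {x0 : Int} (hx00 : 0 ≤ x0) (hx01 : x0 < 100000) :
    ∀ (fuel : Nat) (hist : List Int) (ts : Array Int),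
    TsSpec hist ts.toList → hist.Nodup → (∀ a ∈ hist, 0 ≤ a ∧ a < 100000) →
    (∀ j (hj : j < hist.length), hist[j] = orb x0 j) →
    100001 ≤ hist.length + fuel →
    ∃ (hist' : List Int) (ts' : Array Int),
      loopA nxtTable fuel ts (orb x0 hist.length) (hist.length : Int)
        = (ts', orb x0 hist'.length, (hist'.length : Int)) ∧
      TsSpec hist' ts'.toList ∧ hist'.Nodup ∧ (∀ a ∈ hist', 0 ≤ a ∧ a < 100000) ∧
      (∀ j (hj : j < hist'.length), hist'[j] = orb x0 j) ∧
      orb x0 hist'.length ∈ hist' := by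
  intro fuel
  induction fuel with
  | zero =>
    intro hist ts _ hnd hb _ hfuel
    have := length_le_100000 hnd hb
    omega
  | succ fuel ih =>
    intro hist ts hts hnd hb hinv hfuel
    set pos := orb x0 hist.length with hposdef
    obtain ⟨hp0, hp1⟩ := orb_bounds hx00 hx01 hist.length
    have hlen100 : (ts.toList.length : Int) = 100000 := by exact_mod_cast congrArg Nat.cast hts.1
    by_cases hmem : pos ∈ hist
    · obtain ⟨m, hm⟩ := Option.isSome_iff_exists.1 ((PySem.List.index?_isSome_iff _ _).2 hmem)
      have hcond : aGet ts pos 0 ≠ -1 := by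
        rw [aGet_eq_pyGetD _ _ _ (by omega) (by omega),
          pyGetD_of_TsSpec hts hp0 hp1, stampOf_of_index? hm]
        omega
      refine ⟨hist, ts, ?_, hts, hnd, hb, hinv, hmem⟩
      rw [loopA, if_neg hcond]
    · have hcond : aGet ts pos 0 = -1 := by
        rw [aGet_eq_pyGetD _ _ _ (by omega) (by omega),
          pyGetD_of_TsSpec hts hp0 hp1, stampOf_not_mem hmem]
      have hset : (aSet ts pos (hist.length : Int)).toList
          = PySem.List.pySetD ts.toList pos (hist.length : Int) :=
        aSet_toList_pySetD _ _ _ (by omega) (by omega)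
      have hlen2 : ((hist ++ [pos]).length : Int) = (hist.length : Int) + 1 := by
        rw [List.length_append]; push_cast [List.length_singleton]; omega
      have hstep : aGet nxtTable pos 0 = orb x0 (hist ++ [pos]).length := by
        rw [nxt_getD hp0 hp1, List.length_append, List.length_singleton, orb_succ]
      have hA : loopA nxtTable (fuel+1) ts pos (hist.length : Int)
          = loopA nxtTable fuel (aSet ts pos (hist.length : Int))
              (orb x0 (hist ++ [pos]).length) ((hist ++ [pos]).length : Int) := by
        rw [loopA, if_pos hcond, hstep, hlen2]
      have hts' : TsSpec (hist ++ [pos]) (aSet ts pos (hist.length : Int)).toList := by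
        rw [hset]
        exact set_TsSpec hts hp0 hp1 hmem
      have hnd' : (hist ++ [pos]).Nodup :=
        List.Nodup.append hnd (List.nodup_singleton pos) (List.disjoint_singleton.2 hmem)
      have hb' : ∀ a ∈ hist ++ [pos], 0 ≤ a ∧ a < 100000 := by
        intro a ha
        rcases List.mem_append.1 ha with ha | ha
        · exact hb a ha
        · simp at ha; subst ha; exact ⟨hp0, hp1⟩
      have hinv' : ∀ j (hj : j < (hist ++ [pos]).length), (hist ++ [pos])[j] = orb x0 j := by
        intro j hj
        rcases Nat.lt_or_ge j hist.length with hlt | hge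
        · rw [List.getElem_append_left hlt]; exact hinv j hlt
        · have hj' : j = hist.length := by
            rw [List.length_append, List.length_singleton] at hj; omega
          subst hj'
          rw [List.getElem_concat_length, hposdef]
          rfl
      obtain ⟨hist', ts', hA2, rest⟩ :=
        ih (hist ++ [pos]) (aSet ts pos (hist.length : Int)) hts' hnd' hb' hinv'
          (by rw [List.length_append, List.length_singleton]; omega)
      exact ⟨hist', ts', by rw [hA, hA2], rest⟩

lemma index?_TsSpec {hist ts : List Int} (hts : TsSpec hist ts) (hnd : hist.Nodup)
    (hb : ∀ x ∈ hist, 0 ≤ x ∧ x < 100000) (j : Nat) (hj : j < hist.length) :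
    PySem.List.index? ts ((j : Nat) : Int) = some (hist[j].toNat) := by
  obtain ⟨hl, hs⟩ := hts
  have hbj := hb (hist[j]) (List.getElem_mem hj)
  have hw : hist[j].toNat < ts.length := by omega
  apply index?_of_getElem hw
  · have := hs (hist[j].toNat) (by omega)
    have he : ts[hist[j].toNat] = stampOf hist ((hist[j].toNat : Nat) : Int) := by
      have h2 := List.getElem?_eq_getElem hw
      rw [h2] at this
      exact Option.some_injective _ this
    rw [he, show ((hist[j].toNat : Nat) : Int) = hist[j] from by omega,
      stampOf_of_index? (index?_self_of_nodup hnd j hj)]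
  · intro u hu hne
    have hu2 : u < 100000 := by omega
    have he : ts[u]'(by omega) = stampOf hist ((u : Nat) : Int) := by
      have := hs u hu2
      have h2 := List.getElem?_eq_getElem (show u < ts.length from by omega)
      rw [h2] at this
      exact Option.some_injective _ this
    rw [he] at hne
    rcases hcase : PySem.List.index? hist ((u : Nat) : Int) with _ | m
    · rw [stampOf_not_mem ((PySem.List.index?_eq_none_iff _ _).1 hcase)] at hne
      omega
    · rw [stampOf_of_index? hcase] at hne
      have hmj : m = j := by omega
      subst hmj
      obtain ⟨hk2, hval, _⟩ := PySem.List.getElem_of_index?_eq_some hcase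
      omega

lemma replicate_TsSpec : TsSpec [] (List.replicate 100000 (-1)) := by
  constructor
  · exact List.length_replicate
  · intro k hk
    rw [List.getElem?_replicate, if_pos hk]
    rfl

lemma aGet_neg_shift (a : Array Int) (i d : Int) (hsz : a.size = 100000)
    (h1 : -100000 ≤ i) (h2 : i < 0) : aGet a i d = aGet a (i + 100000) d := by
  unfold aGet
  rw [if_neg (by omega), if_pos (by omega),
    show a.size - (-i).toNat = (i + 100000).toNat from by omega]

lemma aSet_neg_shift (a : Array Int) (i v : Int) (hsz : a.size = 100000)
    (h1 : -100000 ≤ i) (h2 : i < 0) : aSet a i v = aSet a (i + 100000) v := by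
  unfold aSet
  rw [if_neg (by omega), if_pos (by omega),
    show a.size - (-i).toNat = (i + 100000).toNat from by omega]

lemma size_nxtTable : nxtTable.size = 100000 := by
  have h := nxt_len
  have h2 : nxtTable.toList.length = nxtTable.size := Array.length_toList
  omega

lemma loopA_neg_start (fuel : Nat) (ts : Array Int) (cnt N : Int)
    (hlen : ts.size = 100000) (h1 : -100000 ≤ N) (h2 : N < 0)
    (hcond : aGet ts (N+100000) 0 = -1) :
    loopA nxtTable (fuel+1) ts N cnt = loopA nxtTable (fuel+1) ts (N+100000) cnt := by
  rw [loopA, loopA, aGet_neg_shift ts N 0 hlen h1 h2, aSet_neg_shift ts N cnt hlen h1 h2,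
    aGet_neg_shift nxtTable N 0 size_nxtTable h1 h2, if_pos hcond, if_pos hcond]

lemma final_eq {hist ts : List Int} (hts : TsSpec hist ts) (hnd : hist.Nodup)
    (hb : ∀ x ∈ hist, 0 ≤ x ∧ x < 100000) (j : Nat) (hj : j < hist.length) :
    (((PySem.List.index? ts ((j : Nat) : Int)).getD 0 : Nat) : Int) = hist[j] := by
  rw [index?_TsSpec hts hnd hb j hj]
  have := (hb _ (List.getElem_mem hj)).1
  simp only [Option.getD_some]
  omega

-- ===== orbit structure: eventual periodicity derived from A's loop result =====

lemma orb_shift {x0 : Int} {m l : Nat} (hper : orb x0 (m+l) = orb x0 m) (j : Nat) :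
    orb x0 (m + j + l) = orb x0 (m + j) := by
  have e1 : m + j + l = (m + l) + j := by omega
  rw [e1, orb_add, hper, ← orb_add]

lemma orb_drop {x0 : Int} {m l : Nat} (hper : orb x0 (m+l) = orb x0 m) :
    ∀ (d k : Nat), m ≤ k → orb x0 (k + d * l) = orb x0 k := by
  intro d
  induction d with
  | zero => intro k _; simp
  | succ d ih =>
    intro k hk
    have e1 : k + (d+1) * l = (m + (k + d * l - m)) + l := by
      have : (d+1) * l = d * l + l := Nat.succ_mul d l
      omega
    rw [e1, orb_shift hper, show m + (k + d * l - m) = k + d * l from by omega, ih k hk]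

lemma orb_rho {x0 : Int} {m l : Nat} (hper : orb x0 (m+l) = orb x0 m)
    {k : Nat} (hk : m ≤ k) : orb x0 k = orb x0 (m + (k - m) % l) := by
  have h := Nat.div_add_mod (k - m) l
  have h' : (k - m) / l * l + (k - m) % l = k - m := by
    rw [Nat.mul_comm] at h; exact h
  conv_lhs => rw [show k = (m + (k - m) % l) + ((k - m) / l) * l from by omega]
  rw [orb_drop hper ((k - m) / l) (m + (k - m) % l) (by omega)]

lemma eq_iff_ge {x0 : Int} {m l : Nat} (hl : 1 ≤ l) (hper : orb x0 (m+l) = orb x0 m)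
    (hinj : ∀ i j, i < j → j < m + l → orb x0 i ≠ orb x0 j) :
    ∀ i j, i ≤ j → (orb x0 i = orb x0 j ↔ i = j ∨ (m ≤ i ∧ l ∣ (j - i))) := by
  intro i j hij
  constructor
  · intro heq
    set ri := if i < m then i else m + (i - m) % l with hridef
    set rj := if j < m then j else m + (j - m) % l with hrjdef
    have hri : orb x0 i = orb x0 ri := by
      rw [hridef]; split_ifs with h
      · rfl
      · exact orb_rho hper (by omega)
    have hrj : orb x0 j = orb x0 rj := by
      rw [hrjdef]; split_ifs with h
      · rfl
      · exact orb_rho hper (by omega)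
    have hriT : ri < m + l := by
      rw [hridef]; split_ifs with h
      · omega
      · have := Nat.mod_lt (i - m) (show 0 < l from by omega); omega
    have hrjT : rj < m + l := by
      rw [hrjdef]; split_ifs with h
      · omega
      · have := Nat.mod_lt (j - m) (show 0 < l from by omega); omega
    have hrr : ri = rj := by
      by_contra hne
      rcases Nat.lt_or_ge ri rj with hlt | hge
      · exact hinj ri rj hlt hrjT (by rw [← hri, ← hrj]; exact heq)
      · have hlt : rj < ri := by omega
        exact hinj rj ri hlt hriT (by rw [← hri, ← hrj]; exact heq.symm)
    rcases Nat.lt_or_ge i m with him | him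
    · rcases Nat.lt_or_ge j m with hjm | hjm
      · left
        rw [hridef, hrjdef, if_pos him, if_pos hjm] at hrr
        exact hrr
      · exfalso
        rw [hridef, hrjdef, if_pos him, if_neg (by omega)] at hrr
        omega
    · right
      refine ⟨him, ?_⟩
      have hjm : m ≤ j := by omega
      rw [hridef, hrjdef, if_neg (by omega), if_neg (by omega)] at hrr
      have hmod : (i - m) % l = (j - m) % l := by omega
      have hmeq : Nat.ModEq l (i - m) (j - m) := hmod
      have hdvd := (Nat.modEq_iff_dvd' (by omega)).1 hmeq
      have : j - m - (i - m) = j - i := by omega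
      rwa [this] at hdvd
  · intro hcase
    rcases hcase with hcase | ⟨him, hdvd⟩
    · rw [hcase]
    · obtain ⟨c, hc⟩ := hdvd
      rw [show j = i + c * l from by rw [Nat.mul_comm]; omega, orb_drop hper c i him]

-- ===== the three Floyd loops, run on the orbit =====

lemma phase1_spec {x0 : Int} {istar : Nat}
    (hgood : 0 < istar ∧ orb x0 istar = orb x0 (2*istar))
    (hleast : ∀ i, i < istar → ¬(0 < i ∧ orb x0 i = orb x0 (2*i))) :
    ∀ (fuel i : Nat), 0 < i → i ≤ istar → istar - i < fuel →
      phase1 fuel (orb x0 i) (orb x0 (2*i)) = orb x0 istar := by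
  intro fuel
  induction fuel with
  | zero => intro i _ _ h; omega
  | succ fuel ih =>
    intro i hi0 hile hfuel
    rw [phase1]
    by_cases heq : orb x0 i = orb x0 (2*i)
    · rw [if_pos heq]
      have : i = istar := by
        by_contra hne
        exact hleast i (by omega) ⟨hi0, heq⟩
      rw [this, ← hgood.2]
    · rw [if_neg heq]
      have hlt : i < istar := by
        rcases Nat.lt_or_ge i istar with h | h
        · exact h
        · exfalso
          have : i = istar := by omega
          exact heq (this ▸ hgood.2)
      have e1 : step (orb x0 i) = orb x0 (i+1) := (orb_succ x0 i).symm
      have e2 : step (step (orb x0 (2*i))) = orb x0 (2*(i+1)) := by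
        rw [← orb_succ, ← orb_succ, show 2*i+1+1 = 2*(i+1) from by omega]
      rw [e1, e2]
      exact ih (i+1) (by omega) (by omega) (by omega)

lemma phase2_spec {x0 : Int} {m c : Nat}
    (hiff : ∀ k, orb x0 k = orb x0 (k + c) ↔ m ≤ k) :
    ∀ (fuel k : Nat), k ≤ m → m - k < fuel →
      phase2 fuel (k : Int) (orb x0 k) (orb x0 (k + c)) = ((m : Int), orb x0 m) := by
  intro fuel
  induction fuel with
  | zero => intro k _ h; omega
  | succ fuel ih =>
    intro k hkle hfuel
    rw [phase2]
    by_cases heq : orb x0 k = orb x0 (k + c)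
    · rw [if_pos heq]
      have : m ≤ k := (hiff k).1 heq
      have hk : k = m := by omega
      rw [hk]
    · rw [if_neg heq]
      have hlt : k < m := by
        rcases Nat.lt_or_ge k m with h | h
        · exact h
        · exact absurd ((hiff k).2 h) heq
      have e0 : (k : Int) + 1 = ((k+1 : Nat) : Int) := by push_cast; ring
      have e1 : step (orb x0 k) = orb x0 (k+1) := (orb_succ x0 k).symm
      have e2 : step (orb x0 (k + c)) = orb x0 ((k+1) + c) := by
        rw [← orb_succ, show k+c+1 = (k+1)+c from by omega]
      rw [e0, e1, e2]
      exact ih (k+1) (by omega) (by omega)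

lemma phase3_spec {x0 : Int} {m l : Nat}
    (hiff : ∀ j, 0 < j → (orb x0 m = orb x0 (m + j) ↔ l ∣ j)) :
    ∀ (fuel j : Nat), 0 < j → j ≤ l → l - j < fuel →
      phase3 fuel (j : Int) (orb x0 m) (orb x0 (m + j)) = (l : Int) := by
  intro fuel
  induction fuel with
  | zero => intro j _ _ h; omega
  | succ fuel ih =>
    intro j hj0 hjle hfuel
    rw [phase3]
    by_cases heq : orb x0 m = orb x0 (m + j)
    · rw [if_pos heq]
      have hdvd : l ∣ j := (hiff j hj0).1 heq
      have : l ≤ j := Nat.le_of_dvd hj0 hdvd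
      have hj : j = l := by omega
      rw [hj]
    · rw [if_neg heq]
      have hlt : j < l := by
        rcases Nat.lt_or_ge j l with h | h
        · exact h
        · have hj : j = l := by omega
          exact absurd ((hiff j hj0).2 (hj ▸ dvd_refl l)) heq
      have e0 : (j : Int) + 1 = ((j+1 : Nat) : Int) := by push_cast; ring
      have e1 : step (orb x0 (m + j)) = orb x0 (m + (j+1)) := by
        rw [← orb_succ, show m+j+1 = m+(j+1) from by omega]
      rw [e0, e1]
      exact ih (j+1) (by omega) (by omega) (by omega)

lemma foldl_step_iterate : ∀ (xs : List Int) (s : Int),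
    xs.foldl (fun p _ => step p) s = step^[xs.length] s := by
  intro xs
  induction xs with
  | nil => intro s; rfl
  | cons a xs ih =>
    intro s
    rw [List.foldl_cons, ih, List.length_cons, Function.iterate_succ_apply]

theorem main_eq (N K : Int) (hN1 : -100000 ≤ N) (hN2 : N < 100000) (hK : 0 ≤ K) :
    original_calculator N K = original_calculator_alt N K := by
  have hpos100 : (0:Int) < 100000 := by norm_num
  set M := PySem.Int.mod N 100000 with hMdef
  have hMe : M = N % 100000 := PySem.Int.mod_eq_emod_of_pos hpos100
  have hM0 : 0 ≤ M := by omega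
  have hM1 : M < 100000 := by omega
  -- A's loop starts at N (possibly negative, read via Python's negative indexing) but
  -- behaves as if started at M
  have hstart : loopA nxtTable 100001 (Array.replicate 100000 (-1)) N 0
      = loopA nxtTable 100001 (Array.replicate 100000 (-1)) M 0 := by
    by_cases hN : 0 ≤ N
    · have : M = N := by omega
      rw [this]
    · have hM : M = N + 100000 := by omega
      rw [hM]
      apply loopA_neg_start _ _ _ _ Array.size_replicate hN1 (by omega)
      unfold aGet
      rw [if_pos (by omega), arr_getD_toList, Array.toList_replicate,
        List.getD_eq_getElem _ _ (by rw [List.length_replicate]; omega)]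
      exact List.getElem_replicate _
  obtain ⟨hist', ts', hA, hts, hnd, hb, hinv, hmem⟩ :=
    loopA_corr hM0 hM1 100001 [] (Array.replicate 100000 (-1))
      (by rw [Array.toList_replicate]; exact replicate_TsSpec)
      List.nodup_nil (by simp) (by intro j hj; simp at hj) (by simp)
  simp only [List.length_nil, Nat.cast_zero, show orb M 0 = M from rfl] at hA
  set T := hist'.length with hTdef
  have hT100 : T ≤ 100000 := length_le_100000 hnd hb
  -- the index m of the first repeated value, from A's side
  obtain ⟨m, hm⟩ := Option.isSome_iff_exists.1 ((PySem.List.index?_isSome_iff _ _).2 hmem)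
  obtain ⟨hmlt, hmval, _⟩ := PySem.List.getElem_of_index?_eq_some hm
  set l := T - m with hldef
  have hl1 : 1 ≤ l := by omega
  have hper : orb M (m + l) = orb M m := by
    rw [show m + l = T from by omega, ← hinv m (by omega), hmval]
  have hinjOrb : ∀ i j, i < j → j < m + l → orb M i ≠ orb M j := by
    intro i j hij hjT heq
    have hiT : i < T := by omega
    have hjT' : j < T := by omega
    have : hist'[i] = hist'[j] := by rw [hinv i hiT, hinv j hjT', heq]
    exact absurd ((List.Nodup.getElem_inj_iff hnd).1 this) (by omega)
  have heqiff := eq_iff_ge hl1 hper hinjOrb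
  -- existence of a meeting index for phase 1
  have hwdvd : l ∣ l * (m / l + 1) := Dvd.intro _ rfl
  have hwge : m < l * (m / l + 1) := by
    have h := Nat.div_add_mod m l
    have h2 : l * (m / l + 1) = l * (m / l) + l := Nat.mul_succ l (m / l)
    have h3 : m % l < l := Nat.mod_lt _ (by omega)
    omega
  have hwle : l * (m / l + 1) ≤ m + l := by
    have h := Nat.div_add_mod m l
    have h2 : l * (m / l + 1) = l * (m / l) + l := Nat.mul_succ l (m / l)
    omega
  have hPw : 0 < l * (m / l + 1) ∧ orb M (l * (m / l + 1)) = orb M (2 * (l * (m / l + 1))) := by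
    refine ⟨by positivity, ?_⟩
    apply (heqiff _ _ (by omega)).2
    right
    exact ⟨by omega, by rw [show 2 * (l * (m / l + 1)) - l * (m / l + 1) = l * (m / l + 1) from by omega]; exact hwdvd⟩
  have hPex : ∃ i, 0 < i ∧ orb M i = orb M (2*i) := ⟨_, hPw⟩
  set istar := Nat.find hPex with histardef
  have histar := Nat.find_spec hPex
  have histar_le : istar ≤ l * (m / l + 1) := Nat.find_min' hPex hPw
  have histar_least : ∀ i, i < istar → ¬(0 < i ∧ orb M i = orb M (2*i)) :=
    fun i hi => Nat.find_min hPex hi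
  have histar_bound : istar ≤ m + l := by omega
  have histar_props : m ≤ istar ∧ l ∣ istar := by
    have h := (heqiff istar (2*istar) (by omega)).1 histar.2
    rcases h with h | h
    · omega
    · exact ⟨h.1, by rw [show 2*istar - istar = istar from by omega] at h; exact h.2⟩
  -- evaluate both ports
  unfold original_calculator original_calculator_alt
  dsimp only
  rw [← hMdef, hstart, hA]
  dsimp only
  -- A's mu is the stamp of the repeated value, i.e. m
  obtain ⟨hp0, hp1⟩ := orb_bounds hM0 hM1 T
  have hlen100 : (ts'.toList.length : Int) = 100000 := by exact_mod_cast congrArg Nat.cast hts.1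
  rw [aGet_eq_pyGetD _ _ _ (by omega) (by omega), pyGetD_of_TsSpec hts hp0 hp1,
    stampOf_of_index? hm]
  -- B's phase 1
  have hmeet : phase1 100001 (step M) (step (step M)) = orb M istar := by
    have e1 : step M = orb M 1 := by rw [orb_succ]; rfl
    have e2 : step (step M) = orb M (2*1) := by
      rw [show 2*1 = 1+1 from rfl, orb_succ, orb_succ]; rfl
    rw [e2, e1]
    exact phase1_spec histar histar_least 100001 1 (by omega) (by omega) (by omega)
  -- B's phase 2
  have hiff2 : ∀ k, orb M k = orb M (k + istar) ↔ m ≤ k := by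
    intro k
    rw [heqiff k (k + istar) (by omega)]
    constructor
    · intro h
      rcases h with h | h
      · omega
      · exact h.1
    · intro h
      right
      exact ⟨h, by rw [show k + istar - k = istar from by omega]; exact histar_props.2⟩
  have hphase2 : phase2 100001 0 M (phase1 100001 (step M) (step (step M)))
      = ((m : Int), orb M m) := by
    rw [hmeet]
    have h2 := phase2_spec hiff2 100001 0 (by omega) (by omega)
    rw [Nat.zero_add] at h2
    exact h2
  rw [hphase2]
  dsimp only
  -- B's phase 3
  have hiff3 : ∀ j, 0 < j → (orb M m = orb M (m + j) ↔ l ∣ j) := by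
    intro j hj
    rw [heqiff m (m + j) (by omega)]
    constructor
    · intro h
      rcases h with h | h
      · omega
      · rw [show m + j - m = j from by omega] at h
        exact h.2
    · intro h
      right
      exact ⟨le_refl m, by rw [show m + j - m = j from by omega]; exact h⟩
  have hphase3 : phase3 100001 1 (orb M m) (step (orb M m)) = (l : Int) := by
    have e1 : step (orb M m) = orb M (m + 1) := by rw [← orb_succ]
    rw [e1]
    exact phase3_spec hiff3 100001 1 (by omega) (by omega) (by omega)
  rw [hphase3]
  -- the reduced step counts agree
  have hcyc : (T : Int) - (m : Int) = (l : Int) := by omega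
  rw [hcyc]
  set K' := if K ≥ (m : Int) then PySem.Int.mod K (l : Int) else K with hK'def
  have hK'0 : 0 ≤ K' := by
    rw [hK'def]; split_ifs with h
    · exact PySem.Int.mod_nonneg _ (by exact_mod_cast by omega)
    · exact hK
  have hK'T : K'.toNat < T := by
    rw [hK'def]
    split_ifs with h
    · have := PySem.Int.mod_lt K (show (0:Int) < (l:Int) from by exact_mod_cast by omega)
      simp only [hK'def, if_pos h] at hK'0 ⊢
      omega
    · omega
  -- final values
  rw [show K' = ((K'.toNat : Nat) : Int) from by omega]
  rw [final_eq hts hnd hb K'.toNat hK'T, hinv K'.toNat hK'T,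
    foldl_step_iterate, PySem.List.length_pyRange_one]
  rw [show (((K'.toNat : Nat) : Int) - 0).toNat = K'.toNat from by omega]
  rfl

-- ===== VERDICT (by name: the statement is the Claim_ definition above) =====
theorem original_calculator_spec : Claim_equal_original_calculator := by
  intro N K _ hpre
  obtain ⟨h1, h2, h3⟩ := hpre
  unfold Spec_original_calculator
  exact main_eq N K h1 h2 h3
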